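-- pv_equiv track=rewrite | github.com/santiago982/Proyecto-Compilador-2025 | analizador_python.py | dividir_bloques_codigo
-- ===== SOURCE A (Python) =====
-- def dividir_bloques_codigo(codigo):
--     bloques = []
--     bloque_actual = []
--     for linea in codigo.splitlines():
--         if linea.strip() == '':
--             if bloque_actual:
--                 bloques.append('\n'.join(bloque_actual))
--                 bloque_actual = []
--         else:
--             bloque_actual.append(linea)
--     if bloque_actual:
--         bloques.append('\n'.join(bloque_actual))
--     return bloques
-- ===== SOURCE B (Python) =====
-- from itertools import groupby
--
-- def dividir_bloques_codigo(codigo):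
--     return ['\n'.join(grupo)
--             for es_blanco, grupo in groupby(codigo.splitlines(), key=lambda l: l.strip() == '')
--             if not es_blanco]
-- ===== Notes on version B (the rewrite author's own statement) =====
-- stated objective: idiomatic
-- what changed: Replaces the manual running-accumulator loop with its final flush by itertools.groupby over splitlines, keeping only the non-blank runs and joining each.
import Mathlib
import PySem

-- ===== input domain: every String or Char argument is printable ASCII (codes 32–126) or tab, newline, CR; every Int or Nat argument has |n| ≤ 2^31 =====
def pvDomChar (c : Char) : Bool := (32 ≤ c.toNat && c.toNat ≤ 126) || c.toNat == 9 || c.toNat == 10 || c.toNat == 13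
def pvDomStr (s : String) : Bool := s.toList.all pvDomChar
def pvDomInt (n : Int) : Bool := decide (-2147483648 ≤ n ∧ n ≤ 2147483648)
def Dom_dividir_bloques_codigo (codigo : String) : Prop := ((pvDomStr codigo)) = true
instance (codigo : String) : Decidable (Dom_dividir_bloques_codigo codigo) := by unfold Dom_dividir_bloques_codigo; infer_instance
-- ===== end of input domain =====

-- B: itertools.groupby over splitlines, keep the non-blank runs and join each (idiomatic; same cost).

-- ===== PORT A =====
-- the loop body of A: state = (bloques, bloque_actual)
def pvStepA (st : List String × List String) (linea : String) : List String × List String :=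
  if PySem.Str.strip linea == "" then
    if st.2 ≠ [] then (st.1 ++ [PySem.Str.join "\n" st.2], []) else st
  else (st.1, st.2 ++ [linea])

def dividir_bloques_codigo (codigo : String) : List String :=
  let st := (PySem.Str.splitlines codigo).foldl pvStepA ([], [])
  if st.2 ≠ [] then st.1 ++ [PySem.Str.join "\n" st.2] else st.1

-- ===== PORT B =====
-- itertools.groupby: maximal runs of equal key, in order
def pvGroupBy (key : String → Bool) : List String → List (Bool × List String)
  | [] => []
  | x :: xs =>
    (key x, x :: xs.takeWhile (fun y => key y == key x))
      :: pvGroupBy key (xs.dropWhile (fun y => key y == key x))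
termination_by l => l.length
decreasing_by
  simpa using Nat.lt_succ_of_le (List.length_dropWhile_le _ _)

def dividir_bloques_codigo_alt (codigo : String) : List String :=
  (pvGroupBy (fun l => PySem.Str.strip l == "") (PySem.Str.splitlines codigo)).filterMap
    (fun g => if g.1 then none else some (PySem.Str.join "\n" g.2))

-- ===== PRECONDITION & SPEC =====
def Spec_dividir_bloques_codigo (codigo : String) (out : List String) : Prop := out = dividir_bloques_codigo_alt codigo
instance (codigo : String) (out : List String) : Decidable (Spec_dividir_bloques_codigo codigo out) := by unfold Spec_dividir_bloques_codigo; infer_instance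

-- ===== CLAIM (what is proved, stated in full; the proofs are below) =====
def Claim_equal_dividir_bloques_codigo : Prop := ∀ (codigo : String), Dom_dividir_bloques_codigo codigo → Spec_dividir_bloques_codigo codigo (dividir_bloques_codigo codigo)

-- ===== LEMMAS AND PROOFS =====

-- reference recursive form of the block splitter, generic in the blank test p
def pvRef (p : String → Bool) (acc : List String) : List String → List String
  | [] => if acc ≠ [] then [PySem.Str.join "\n" acc] else []
  | l :: ls =>
    if p l then
      (if acc ≠ [] then PySem.Str.join "\n" acc :: pvRef p [] ls else pvRef p [] ls)
    else pvRef p (acc ++ [l]) ls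

-- generic step function matching pvStepA
def pvStep (p : String → Bool) (st : List String × List String) (linea : String) : List String × List String :=
  if p linea then
    if st.2 ≠ [] then (st.1 ++ [PySem.Str.join "\n" st.2], []) else st
  else (st.1, st.2 ++ [linea])

theorem pvFoldl_eq_ref (p : String → Bool) (ls : List String) :
    ∀ (bs acc : List String),
      (let st := ls.foldl (pvStep p) (bs, acc);
        if st.2 ≠ [] then st.1 ++ [PySem.Str.join "\n" st.2] else st.1)
      = bs ++ pvRef p acc ls := by
  induction ls with
  | nil =>
    intro bs acc
    by_cases h : acc = [] <;> simp [pvRef, h]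
  | cons l t ih =>
    intro bs acc
    by_cases hp : p l
    · by_cases h : acc = []
      · simp only [List.foldl_cons, pvStep, hp, if_pos, h, ne_eq, not_true_eq_false,
          if_false, ite_true]
        simpa [pvRef, hp, h] using ih bs []
      · simp only [List.foldl_cons, pvStep, hp, ne_eq, h, not_false_eq_true, if_true]
        have := ih (bs ++ [PySem.Str.join "\n" acc]) []
        simp only [this, pvRef, hp, ne_eq, h, not_false_eq_true, if_true,
          List.append_assoc, List.singleton_append]
    · simp only [List.foldl_cons, pvStep, hp, Bool.false_eq_true, if_false]
      have := ih bs (acc ++ [l])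
      simpa [pvRef, hp] using this

theorem pvRef_skip_blanks (p : String → Bool) (ls : List String) :
    pvRef p [] ls = pvRef p [] (ls.dropWhile (fun y => p y == true)) := by
  induction ls with
  | nil => rfl
  | cons l t ih =>
    by_cases hp : p l
    · simp [pvRef, hp, ih]
    · simp [pvRef, hp]

theorem pvRef_run (p : String → Bool) (ls : List String) :
    ∀ acc, acc ≠ [] →
      pvRef p acc ls
        = PySem.Str.join "\n" (acc ++ ls.takeWhile (fun y => p y == false))
            :: pvRef p [] (ls.dropWhile (fun y => p y == false)) := by
  induction ls with
  | nil => intro acc h; simp [pvRef, h]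
  | cons l t ih =>
    intro acc h
    by_cases hp : p l
    · simp [pvRef, hp, h]
    · simp only [pvRef, hp, Bool.false_eq_true, if_false,
        List.takeWhile_cons, List.dropWhile_cons]
      have := ih (acc ++ [l]) (by simp)
      simp [this]

theorem pvRef_eq_groupBy (p : String → Bool) (ls : List String) :
    pvRef p [] ls
      = (pvGroupBy p ls).filterMap
          (fun g => if g.1 then none else some (PySem.Str.join "\n" g.2)) := by
  induction ls using pvGroupBy.induct p with
  | case1 => simp [pvRef, pvGroupBy]
  | case2 x xs ih =>
    by_cases hp : p x
    · simp only [pvGroupBy, hp, List.filterMap_cons, if_pos]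
      rw [pvRef_skip_blanks p (x :: xs)]
      simp only [List.dropWhile_cons, hp, beq_self_eq_true, if_pos]
      simp only [hp] at ih
      exact ih
    · have h1 : pvRef p [] (x :: xs) = pvRef p [x] xs := by
        simp [pvRef, hp]
      rw [h1, pvRef_run p xs [x] (by simp)]
      simp only [pvGroupBy, hp, List.filterMap_cons, Bool.false_eq_true, if_false]
      simp only [hp] at ih ⊢
      rw [ih]
      simp

-- ===== VERDICT (by name: the statement is the Claim_ definition above) =====
theorem dividir_bloques_codigo_spec : Claim_equal_dividir_bloques_codigo := by
  intro codigo _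
  unfold Spec_dividir_bloques_codigo dividir_bloques_codigo dividir_bloques_codigo_alt
  have hstep : pvStepA = pvStep (fun l => PySem.Str.strip l == "") := rfl
  rw [hstep, pvFoldl_eq_ref, pvRef_eq_groupBy]
  rfl
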